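-- pv_equiv track=rewrite | github.com/jacksonsdean/cppn_torch | cppn_torch/graph_util.py | required_for_output
-- ===== SOURCE A (Python) =====
-- def required_for_output(inputs, outputs, connections):
--     """
--     Collect the nodes whose state is required to compute the final network output(s).
--     :param inputs: list of the input identifiers
--     :param outputs: list of the output node identifiers
--     :param connections: list of (input, output) connections in the network.
--     NOTE: It is assumed that the input identifier set and the node identifier set are disjoint.
--     By convention, the output node ids are always the same as the output index.
--
--     Returns a set of identifiers of required nodes.
--     From: https://neat-python.readthedocs.io/en/latest/_modules/graphs.html
--     """
--
--     required = set(outputs) # outputs always required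
--     s = set(outputs)
--     while 1:
--         # Find nodes not in S whose output is consumed by a node in s.
--         t = set(a for (a, b) in connections if b in s and a not in s)
--
--         if not t:
--             break
--
--         layer_nodes = set(x for x in t if x not in inputs)
--         if not layer_nodes:
--             break
--
--         required = required.union(layer_nodes)
--         s = s.union(t)
--
--     return required
-- ===== SOURCE B (Python) =====
-- def required_for_output(inputs, outputs, connections):
--     """Backward layered reachability over a reverse-adjacency index built once.
--
--     Instead of rescanning every connection against the whole visited set on
--     each round, index the connections by their target node (keeping each
--     edge's position so every layer is discovered in connection order), then
--     expand only the previous frontier's incoming edges.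
--     """
--     pred = {}
--     for i, (a, b) in enumerate(connections):
--         pred.setdefault(b, []).append((i, a))
--     input_set = set(inputs)
--     seen = set(outputs)
--     required = list(dict.fromkeys(outputs))
--     frontier = list(dict.fromkeys(outputs))
--     while frontier:
--         cand = []
--         for x in frontier:
--             cand.extend(pred.get(x, []))
--         cand.sort(key=lambda p: p[0])
--         t = []
--         t_set = set()
--         for _, a in cand:
--             if a not in seen and a not in t_set:
--                 t.append(a)
--                 t_set.add(a)
--         if not t:
--             break
--         layer = [x for x in t if x not in input_set]
--         if not layer:
--             break
--         required.extend(layer)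
--         seen.update(t)
--         frontier = t
--     return set(required)
-- ===== Notes on version B (the rewrite author's own statement) =====
-- stated objective: faster
-- what changed: B builds a reverse-adjacency index (target -> edge-position/source pairs) once and expands only the previous frontier's incoming edges each round, instead of A's rescan of every connection against the whole visited set on every round.
import Mathlib
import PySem

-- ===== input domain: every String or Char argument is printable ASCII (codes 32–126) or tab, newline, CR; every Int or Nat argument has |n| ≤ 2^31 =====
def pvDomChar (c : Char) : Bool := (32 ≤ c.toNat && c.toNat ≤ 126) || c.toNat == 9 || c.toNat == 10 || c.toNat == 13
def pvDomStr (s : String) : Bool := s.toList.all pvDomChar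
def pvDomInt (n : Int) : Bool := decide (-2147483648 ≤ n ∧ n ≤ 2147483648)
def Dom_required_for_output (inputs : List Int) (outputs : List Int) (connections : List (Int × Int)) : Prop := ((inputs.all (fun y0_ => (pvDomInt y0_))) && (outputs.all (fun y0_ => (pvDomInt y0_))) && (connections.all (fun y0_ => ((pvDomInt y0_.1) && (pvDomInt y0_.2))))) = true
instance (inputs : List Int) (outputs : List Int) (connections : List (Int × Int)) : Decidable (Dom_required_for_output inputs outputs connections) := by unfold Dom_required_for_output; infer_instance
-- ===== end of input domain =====

-- B replaces A's per-round rescan of all connections against the whole visited set by a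
-- reverse-adjacency index (target -> positioned sources) built once, expanding only the
-- previous frontier's incoming edges each round (objective: faster).
-- Both Pythons return a set; the ports return its element list in first-insertion order.

-- ===== PORT A =====
-- t = set(a for (a, b) in connections if b in s and a not in s)
def roA_t (s : PySem.Set Int) (connections : List (Int × Int)) : PySem.Set Int :=
  PySem.Set.ofList ((connections.filter (fun p => s.contains p.2 && !s.contains p.1)).map (fun p => p.1))

-- the 'while 1' loop; fuel connections.length + 1 suffices: every iteration that loops
-- again adds at least one new connection source to s
def roA_loop (inputs : List Int) (connections : List (Int × Int)) :
    Nat → PySem.Set Int → PySem.Set Int → List Int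
  | 0, required, _ => required
  | fuel+1, required, s =>
    let t := roA_t s connections
    if t.isEmpty then required
    else
      let layer_nodes := PySem.Set.ofList (t.filter (fun x => !inputs.contains x))
      if layer_nodes.isEmpty then required
      else roA_loop inputs connections fuel (required.union layer_nodes) (s.union t)

def required_for_output (inputs : List Int) (outputs : List Int) (connections : List (Int × Int)) : List Int :=
  roA_loop inputs connections (connections.length + 1) (PySem.Set.ofList outputs) (PySem.Set.ofList outputs)

-- ===== PORT B =====
-- pred = {}; for i, (a, b) in enumerate(connections): pred.setdefault(b, []).append((i, a))
def roB_pred (connections : List (Int × Int)) : PySem.Dict Int (List (Int × Int)) :=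
  (PySem.List.enumerate connections).foldl
    (fun d q => d.modify q.2.2 [] (fun l => l ++ [(q.1, q.2.1)])) PySem.Dict.empty

-- t = []; for _, a in cand: if a not in seen and a not in t_set: t.append(a) …
-- (t_set mirrors t's members; the port tests membership in t directly)
def roB_t (seen : PySem.Set Int) (cand : List (Int × Int)) : List Int :=
  cand.foldl (fun t p => if !seen.contains p.2 && !t.contains p.2 then t ++ [p.2] else t) []

-- the 'while frontier' loop (same fuel bound as A's loop: B loops again only when A does)
def roB_loop (input_set : PySem.Set Int) (pred : PySem.Dict Int (List (Int × Int))) :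
    Nat → List Int → PySem.Set Int → List Int → List Int
  | 0, required, _, _ => required
  | fuel+1, required, seen, frontier =>
    if frontier.isEmpty then required
    else
      let cand := PySem.List.sorted (frontier.flatMap (fun x => pred.getD x [])) (fun p => p.1)
      let t := roB_t seen cand
      if t.isEmpty then required
      else
        let layer := t.filter (fun x => !input_set.contains x)
        if layer.isEmpty then required
        else roB_loop input_set pred fuel (required ++ layer) (seen.update t) t

def required_for_output_alt (inputs : List Int) (outputs : List Int) (connections : List (Int × Int)) : List Int :=
  PySem.Set.ofList
    (roB_loop (PySem.Set.ofList inputs) (roB_pred connections) (connections.length + 1)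
      (PySem.List.dedup outputs) (PySem.Set.ofList outputs) (PySem.List.dedup outputs))

-- ===== PRECONDITION & SPEC =====
def Spec_required_for_output (inputs : List Int) (outputs : List Int) (connections : List (Int × Int)) (out : List Int) : Prop := out = required_for_output_alt inputs outputs connections
instance (inputs : List Int) (outputs : List Int) (connections : List (Int × Int)) (out : List Int) : Decidable (Spec_required_for_output inputs outputs connections out) := by unfold Spec_required_for_output; infer_instance

-- ===== CLAIM (what is proved, stated in full; the proofs are below) =====
def Claim_equal_required_for_output : Prop := ∀ (inputs : List Int) (outputs : List Int) (connections : List (Int × Int)), Dom_required_for_output inputs outputs connections → Spec_required_for_output inputs outputs connections (required_for_output inputs outputs connections)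

-- ===== LEMMAS AND PROOFS =====

lemma contains_ofList_eq (inputs : List Int) (x : Int) :
    (PySem.Set.ofList inputs).contains x = inputs.contains x := by
  by_cases h : x ∈ inputs <;>
    simp [PySem.Set.contains_eq_listContains, h, PySem.Set.mem_ofList]

lemma pred_getD (C : List (Int × Int)) (x : Int) :
    (roB_pred C).getD x [] =
      ((PySem.List.enumerate C).filter (fun q => q.2.2 == x)).map (fun q => (q.1, q.2.1)) := by
  unfold roB_pred
  have h := PySem.Dict.getD_foldl_modify_append
      ((PySem.List.enumerate C).map (fun q => (q.2.2, (q.1, q.2.1)))) PySem.Dict.empty x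
  rw [List.foldl_map] at h
  simp only [h]
  rw [List.filter_map, List.map_map]
  simp [Function.comp_def]

lemma perm_filter_append_or {α : Type} (p q : α → Bool) (l : List α)
    (h : ∀ a ∈ l, ¬(p a = true ∧ q a = true)) :
    (l.filter p ++ l.filter q).Perm (l.filter (fun a => p a || q a)) := by
  induction l with
  | nil => simp
  | cons a l ih =>
    have ih' := ih (fun b hb => h b (List.mem_cons_of_mem a hb))
    by_cases hp : p a = true
    · have hq : q a = false := by
        cases hqq : q a
        · rfl
        · exact absurd ⟨hp, hqq⟩ (h a (List.mem_cons_self))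
      simp [hp, hq]
      exact ih'
    · have hp' : p a = false := by cases hpp : p a; rfl; exact absurd hpp hp
      by_cases hq : q a = true
      · simp only [List.filter_cons, hp', hq, Bool.false_or, if_true]
        refine List.perm_middle.trans ?_
        simp
        exact ih'
      · have hq' : q a = false := by cases hqq : q a; rfl; exact absurd hqq hq
        simp [hp', hq']
        exact ih'

lemma flatMap_filter_perm {α : Type} (key : α → Int) (l : List α) (fr : List Int)
    (hnd : fr.Nodup) :
    (fr.flatMap (fun x => l.filter (fun a => key a == x))).Perm
      (l.filter (fun a => fr.contains (key a))) := by
  induction fr with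
  | nil => simp
  | cons x fr ih =>
    have hx : x ∉ fr := (List.nodup_cons.mp hnd).1
    have ih' := ih (List.nodup_cons.mp hnd).2
    simp only [List.flatMap_cons]
    refine ((ih'.append_left (l.filter (fun a => key a == x))).trans ?_)
    refine (perm_filter_append_or _ _ l ?_).trans ?_
    · intro a _ ⟨h1, h2⟩
      have : key a = x := by simpa using h1
      exact hx (by simpa [this] using h2)
    · apply List.Perm.of_eq
      apply List.filter_congr
      intro a _
      by_cases hk : key a = x <;> simp [hk]

lemma cand_sorted (C : List (Int × Int)) (fr : List Int) (hnd : fr.Nodup) :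
    PySem.List.sorted (fr.flatMap (fun x => (roB_pred C).getD x [])) (fun p => p.1) =
      ((PySem.List.enumerate C).filter (fun q => fr.contains q.2.2)).map (fun q => (q.1, q.2.1)) := by
  apply PySem.List.sorted_eq_of_perm_of_pairwise_lt
  · simp only [pred_getD]
    rw [← List.map_flatMap]
    exact ((flatMap_filter_perm (fun q => q.2.2) (PySem.List.enumerate C) fr hnd).map _).symm
  · apply List.pairwise_map.mpr
    exact (PySem.List.pairwise_lt_enumerate C 0).filter _

lemma filter_enumerate_map {α : Type} (P : α → Bool) (l : List α) (s : Int) :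
    ((PySem.List.enumerate l s).filter (fun q => P q.2)).map (fun q => q.2) = l.filter P := by
  induction l generalizing s with
  | nil => simp [PySem.List.enumerate_nil]
  | cons a l ih =>
    rw [PySem.List.enumerate_cons]
    by_cases hp : P a = true
    · simp [hp, ih]
    · have : P a = false := by cases hpp : P a; rfl; exact absurd hpp hp
      simp [this, ih]

lemma roB_t_go (seen : PySem.Set Int) (cand : List (Int × Int)) (t0 : List Int) :
    cand.foldl (fun t p => if !seen.contains p.2 && !t.contains p.2 then t ++ [p.2] else t) t0 =
      ((cand.map (fun p => p.2)).filter (fun a => !seen.contains a)).foldl PySem.Set.add t0 := by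
  induction cand generalizing t0 with
  | nil => rfl
  | cons p cand ih =>
    cases hs : seen.contains p.2
    · simp only [List.foldl_cons, List.map_cons, List.filter_cons, hs, Bool.not_false,
        Bool.true_and, if_true]
      rw [ih]
      congr 1
      rw [PySem.Set.add_eq_ite]
      by_cases ht : p.2 ∈ t0
      · simp [ht]
      · simp [ht]
    · simp only [List.foldl_cons, List.map_cons, List.filter_cons, hs, Bool.not_true,
        Bool.false_and, Bool.false_eq_true, if_false]
      exact ih t0

lemma mem_roA_t (s : PySem.Set Int) (C : List (Int × Int)) (a : Int) :
    a ∈ roA_t s C ↔ ∃ b, (a, b) ∈ C ∧ b ∈ s ∧ a ∉ s := by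
  simp only [roA_t, PySem.Set.mem_ofList, List.mem_map, List.mem_filter]
  constructor
  · rintro ⟨p, ⟨hp, hcond⟩, rfl⟩
    refine ⟨p.2, by simpa using hp, ?_, ?_⟩ <;>
      simp [PySem.Set.contains_eq_listContains] at hcond <;> tauto
  · rintro ⟨b, hmem, hbs, has⟩
    exact ⟨(a, b), ⟨hmem, by simp [PySem.Set.contains_eq_listContains, hbs, has]⟩, rfl⟩

lemma roB_t_eq_roA_t (s : PySem.Set Int) (C : List (Int × Int)) (fr : List Int)
    (hnd : fr.Nodup) (hsub : ∀ x ∈ fr, x ∈ s)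
    (hinv : ∀ p ∈ C, p.2 ∈ s → p.2 ∉ fr → p.1 ∈ s) :
    roB_t s (PySem.List.sorted (fr.flatMap (fun x => (roB_pred C).getD x [])) (fun p => p.1)) =
      roA_t s C := by
  rw [cand_sorted C fr hnd]
  unfold roB_t
  rw [roB_t_go, ← PySem.Set.ofList_eq_foldl]
  unfold roA_t
  congr 1
  rw [List.map_map]
  have hm : ((PySem.List.enumerate C).filter (fun q => fr.contains q.2.2)).map
      ((fun p => p.2) ∘ (fun q => (q.1, q.2.1))) =
      ((C.filter (fun p => fr.contains p.2)).map (fun p => p.1)) := by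
    have h1 := filter_enumerate_map (fun p => fr.contains p.2) C 0
    calc ((PySem.List.enumerate C).filter (fun q => fr.contains q.2.2)).map
          ((fun p => p.2) ∘ (fun q => (q.1, q.2.1)))
        = (((PySem.List.enumerate C).filter (fun q => fr.contains q.2.2)).map
            (fun q => q.2)).map (fun p => p.1) := by rw [List.map_map]; rfl
      _ = ((C.filter (fun p => fr.contains p.2)).map (fun p => p.1)) := by rw [h1]
  rw [hm, List.filter_map, List.filter_filter]
  congr 1
  apply List.filter_congr
  intro p hp
  simp only [Function.comp_def]
  cases h1 : s.contains p.1
  · have hp1 : p.1 ∉ s := by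
      simpa [PySem.Set.contains_eq_listContains] using h1
    cases h2 : s.contains p.2
    · have hp2 : p.2 ∉ s := by simpa [PySem.Set.contains_eq_listContains] using h2
      have : ¬ fr.contains p.2 = true := fun hc =>
        hp2 (hsub p.2 (by simpa using hc))
      simp
      exact fun hm' => this (by simpa using hm')
    · have hp2 : p.2 ∈ s := by simpa [PySem.Set.contains_eq_listContains] using h2
      have : fr.contains p.2 = true := by
        by_contra hc
        exact hp1 (hinv p hp hp2 (fun hm' => hc (by simpa using hm')))
      simp
      exact by simpa using this
  · simp

lemma roA_loop_nodup (inputs : List Int) (C : List (Int × Int)) (fuel : Nat) :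
    ∀ (req s : List Int), req.Nodup → (roA_loop inputs C fuel req s).Nodup := by
  induction fuel with
  | zero => intro req s h; exact h
  | succ fuel ih =>
    intro req s h
    rw [roA_loop]
    dsimp only
    split
    · exact h
    · split
      · exact h
      · exact ih _ _ (PySem.Set.nodup_union _ _ h)

lemma loop_eq (inputs : List Int) (C : List (Int × Int)) (fuel : Nat) :
    ∀ (req s fr : List Int), s.Nodup → fr.Nodup → (∀ x ∈ fr, x ∈ s) → (∀ x ∈ req, x ∈ s) →
      (∀ p ∈ C, p.2 ∈ s → p.2 ∉ fr → p.1 ∈ s) →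
      roA_loop inputs C fuel req s =
        roB_loop (PySem.Set.ofList inputs) (roB_pred C) fuel req s fr := by
  induction fuel with
  | zero => intro req s fr _ _ _ _ _; rfl
  | succ fuel ih =>
    intro req s fr hnds hndf hsub hreq hinv
    rw [roA_loop, roB_loop]
    dsimp only
    by_cases hfr : fr.isEmpty
    · rw [if_pos hfr]
      have hfr' : fr = [] := List.isEmpty_iff.mp hfr
      have htnil : roA_t s C = ([] : List Int) := by
        apply List.eq_nil_iff_forall_not_mem.mpr
        intro a ha
        obtain ⟨b, hmem, hbs, has⟩ := (mem_roA_t s C a).mp ha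
        exact has (hinv (a, b) hmem hbs (by simp [hfr']))
      rw [htnil]
      rfl
    · rw [if_neg hfr]
      rw [roB_t_eq_roA_t s C fr hndf hsub hinv]
      have hndt : (roA_t s C).Nodup := PySem.Set.nodup_ofList _
      have htnotins : ∀ x ∈ roA_t s C, x ∉ s := by
        intro x hx
        exact ((mem_roA_t s C x).mp hx).choose_spec.2.2
      split
      · rfl
      · simp only [contains_ofList_eq]
        have hlayer : PySem.Set.ofList ((roA_t s C).filter (fun x => !inputs.contains x)) =
            (roA_t s C).filter (fun x => !inputs.contains x) :=
          PySem.Set.ofList_eq_self_of_nodup _ (hndt.filter _)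
        rw [hlayer]
        split
        · rfl
        · have hrw : ∀ (u v : PySem.Set Int), PySem.Set.union u v = PySem.Set.update u v :=
            fun _ _ => rfl
          have hunion : PySem.Set.update req ((roA_t s C).filter (fun x => !inputs.contains x)) =
              req ++ (roA_t s C).filter (fun x => !inputs.contains x) := by
            apply PySem.Set.update_eq_append_of_disjoint
            · exact hndt.filter _
            · intro x hx
              exact fun hxr => htnotins x (List.mem_of_mem_filter hx) (hreq x hxr)
          rw [hrw, hrw, hunion]
          apply ih
          · exact PySem.Set.nodup_union _ _ hnds
          · exact hndt
          · intro x hx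
            exact (PySem.Set.mem_union _ _ _).mpr (Or.inr hx)
          · intro x hx
            rcases List.mem_append.mp hx with h | h
            · exact (PySem.Set.mem_union _ _ _).mpr (Or.inl (hreq x h))
            · exact (PySem.Set.mem_union _ _ _).mpr (Or.inr (List.mem_of_mem_filter h))
          · intro p hp hp2 hp2t
            have hp2s : p.2 ∈ s := by
              rcases (PySem.Set.mem_union _ _ _).mp hp2 with h | h
              · exact h
              · exact absurd h hp2t
            by_cases hp1 : p.1 ∈ s
            · exact (PySem.Set.mem_union _ _ _).mpr (Or.inl hp1)
            · refine (PySem.Set.mem_union _ _ _).mpr (Or.inr ?_)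
              exact (mem_roA_t s C p.1).mpr ⟨p.2, by simpa using hp, hp2s, hp1⟩

-- ===== VERDICT (by name: the statement is the Claim_ definition above) =====
theorem required_for_output_spec : Claim_equal_required_for_output := by
  intro inputs outputs connections _
  unfold Spec_required_for_output required_for_output required_for_output_alt
  simp only [PySem.List.dedup_eq_ofList]
  rw [← loop_eq inputs connections (connections.length + 1)
        (PySem.Set.ofList outputs) (PySem.Set.ofList outputs) (PySem.Set.ofList outputs)
        (PySem.Set.nodup_ofList outputs) (PySem.Set.nodup_ofList outputs)
        (fun x hx => hx) (fun x hx => hx)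
        (fun p _ h2 h3 => absurd h2 h3)]
  exact (PySem.Set.ofList_eq_self_of_nodup _
    (roA_loop_nodup inputs connections _ _ _ (PySem.Set.nodup_ofList outputs))).symm
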